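-- pv_equiv track=rewrite | github.com/wysRocket/gsd-saas-creator | scripts/extract_dna.py | _build_color_palette
-- ===== SOURCE A (Python) =====
-- def _build_color_palette(named_colors: dict) -> dict:
--     """
--     Return a structured subset of named colors suitable for template rendering.
--     Groups: brand, surface, semantic, text, outline.
--     """
--     groups = {
--         "brand": ["primary", "secondary", "tertiary", "primary_container",
--                   "secondary_container", "tertiary_container"],
--         "surface": ["background", "surface", "surface_bright", "surface_dim",
--                     "surface_variant", "surface_container", "surface_container_low",
--                     "surface_container_lowest", "surface_container_high",
--                     "surface_container_highest"],
--         "semantic": ["error", "error_container", "on_error", "on_error_container"],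
--         "text": ["on_background", "on_surface", "on_surface_variant", "on_primary",
--                  "on_secondary", "on_tertiary", "on_primary_container",
--                  "on_secondary_container", "on_tertiary_container"],
--         "outline": ["outline", "outline_variant"],
--     }
--     palette = {}
--     for group, keys in groups.items():
--         palette[group] = {k: named_colors[k] for k in keys if k in named_colors}
--     palette["all"] = named_colors
--     return palette
-- ===== SOURCE B (Python) =====
-- # Inverse index: color key -> (group name, rank within group).
-- _INDEX = {
--     "primary": ("brand", 0), "secondary": ("brand", 1), "tertiary": ("brand", 2),
--     "primary_container": ("brand", 3), "secondary_container": ("brand", 4),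
--     "tertiary_container": ("brand", 5),
--     "background": ("surface", 0), "surface": ("surface", 1),
--     "surface_bright": ("surface", 2), "surface_dim": ("surface", 3),
--     "surface_variant": ("surface", 4), "surface_container": ("surface", 5),
--     "surface_container_low": ("surface", 6), "surface_container_lowest": ("surface", 7),
--     "surface_container_high": ("surface", 8), "surface_container_highest": ("surface", 9),
--     "error": ("semantic", 0), "error_container": ("semantic", 1),
--     "on_error": ("semantic", 2), "on_error_container": ("semantic", 3),
--     "on_background": ("text", 0), "on_surface": ("text", 1),
--     "on_surface_variant": ("text", 2), "on_primary": ("text", 3),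
--     "on_secondary": ("text", 4), "on_tertiary": ("text", 5),
--     "on_primary_container": ("text", 6), "on_secondary_container": ("text", 7),
--     "on_tertiary_container": ("text", 8),
--     "outline": ("outline", 0), "outline_variant": ("outline", 1),
-- }
--
-- _GROUP_NAMES = ("brand", "surface", "semantic", "text", "outline")
--
--
-- def _build_color_palette(named_colors: dict) -> dict:
--     # One pass over the INPUT, routing each hit into its group's bucket via the
--     # inverse index; each bucket is then ordered by rank (counting the input once
--     # instead of scanning the group table against the input).
--     buckets = {g: [] for g in _GROUP_NAMES}
--     for k, v in named_colors.items():
--         hit = _INDEX.get(k)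
--         if hit is not None:
--             g, i = hit
--             buckets[g].append((i, k, v))
--     palette = {g: {k: v for _, k, v in sorted(entries, key=lambda t: t[0])}
--                for g, entries in buckets.items()}
--     palette["all"] = named_colors
--     return palette
-- ===== Notes on version B (the rewrite author's own statement) =====
-- stated objective: alternative
-- what changed: Instead of scanning the fixed group table and probing the input per key, B makes a single pass over the input dict, routing each entry through a hardcoded inverse index (key -> (group, rank)) into per-group buckets, then orders each bucket by rank to rebuild the sub-dicts.
import Mathlib
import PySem

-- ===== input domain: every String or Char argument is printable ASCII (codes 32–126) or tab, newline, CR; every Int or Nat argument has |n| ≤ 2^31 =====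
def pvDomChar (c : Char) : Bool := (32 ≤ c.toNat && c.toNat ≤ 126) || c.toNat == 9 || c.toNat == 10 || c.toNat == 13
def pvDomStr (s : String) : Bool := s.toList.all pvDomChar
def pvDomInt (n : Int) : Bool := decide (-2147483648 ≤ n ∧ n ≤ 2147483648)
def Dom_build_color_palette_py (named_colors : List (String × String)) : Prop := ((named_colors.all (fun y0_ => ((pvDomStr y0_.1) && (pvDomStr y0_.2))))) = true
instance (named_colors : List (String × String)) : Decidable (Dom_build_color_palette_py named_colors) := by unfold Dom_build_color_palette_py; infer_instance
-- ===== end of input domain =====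

-- B replaces A's scan of the fixed group table (probing the input per key) with a single
-- pass over the input dict routed through an inverse index key → (group, rank) into
-- per-group buckets, each bucket then ordered by rank (objective: alternative).

-- ===== PORT A =====
def pvGroups : List (String × List String) := [
  ("brand", ["primary", "secondary", "tertiary", "primary_container", "secondary_container", "tertiary_container"]),
  ("surface", ["background", "surface", "surface_bright", "surface_dim", "surface_variant", "surface_container", "surface_container_low", "surface_container_lowest", "surface_container_high", "surface_container_highest"]),
  ("semantic", ["error", "error_container", "on_error", "on_error_container"]),
  ("text", ["on_background", "on_surface", "on_surface_variant", "on_primary", "on_secondary", "on_tertiary", "on_primary_container", "on_secondary_container", "on_tertiary_container"]),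
  ("outline", ["outline", "outline_variant"])
]

def build_color_palette_py (named_colors : List (String × String)) : List (String × List (String × String)) :=
  let nc : PySem.Dict String String := PySem.Dict.ofList named_colors
  let palette : PySem.Dict String (PySem.Dict String String) :=
    pvGroups.foldl (fun p gk =>
      p.insert gk.1 (gk.2.foldl (fun d k =>
        match nc.get? k with
        | some v => d.insert k v
        | none => d) PySem.Dict.empty)) PySem.Dict.empty
  ((palette.insert "all" nc).items).map (fun gv => (gv.1, gv.2.items))

-- ===== PORT B =====
-- the inverse index _INDEX: color key → (group name, rank within group)
def pvIndex : PySem.Dict String (String × Int) := PySem.Dict.mk [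
  ("primary", ("brand", 0)), ("secondary", ("brand", 1)), ("tertiary", ("brand", 2)),
  ("primary_container", ("brand", 3)), ("secondary_container", ("brand", 4)),
  ("tertiary_container", ("brand", 5)),
  ("background", ("surface", 0)), ("surface", ("surface", 1)),
  ("surface_bright", ("surface", 2)), ("surface_dim", ("surface", 3)),
  ("surface_variant", ("surface", 4)), ("surface_container", ("surface", 5)),
  ("surface_container_low", ("surface", 6)), ("surface_container_lowest", ("surface", 7)),
  ("surface_container_high", ("surface", 8)), ("surface_container_highest", ("surface", 9)),
  ("error", ("semantic", 0)), ("error_container", ("semantic", 1)),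
  ("on_error", ("semantic", 2)), ("on_error_container", ("semantic", 3)),
  ("on_background", ("text", 0)), ("on_surface", ("text", 1)),
  ("on_surface_variant", ("text", 2)), ("on_primary", ("text", 3)),
  ("on_secondary", ("text", 4)), ("on_tertiary", ("text", 5)),
  ("on_primary_container", ("text", 6)), ("on_secondary_container", ("text", 7)),
  ("on_tertiary_container", ("text", 8)),
  ("outline", ("outline", 0)), ("outline_variant", ("outline", 1))
]

def pvGroupNames : List String := ["brand", "surface", "semantic", "text", "outline"]

def build_color_palette_py_alt (named_colors : List (String × String)) : List (String × List (String × String)) :=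
  let nc : PySem.Dict String String := PySem.Dict.ofList named_colors
  let buckets0 : PySem.Dict String (List (Int × String × String)) :=
    pvGroupNames.foldl (fun b g => b.insert g []) PySem.Dict.empty
  let buckets : PySem.Dict String (List (Int × String × String)) :=
    nc.items.foldl (fun b kv =>
      match pvIndex.get? kv.1 with
      | some gi => b.modify gi.1 [] (fun es => es ++ [(gi.2, kv.1, kv.2)])
      | none => b) buckets0
  let palette : PySem.Dict String (PySem.Dict String String) :=
    buckets.items.foldl (fun p ge =>
      p.insert ge.1 ((PySem.List.sorted ge.2 (fun t => t.1) false).foldl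
        (fun d t => d.insert t.2.1 t.2.2) PySem.Dict.empty)) PySem.Dict.empty
  ((palette.insert "all" nc).items).map (fun gv => (gv.1, gv.2.items))

-- ===== PRECONDITION & SPEC =====
def Spec_build_color_palette_py (named_colors : List (String × String)) (out : List (String × List (String × String))) : Prop := out = build_color_palette_py_alt named_colors
instance (named_colors : List (String × String)) (out : List (String × List (String × String))) : Decidable (Spec_build_color_palette_py named_colors out) := by unfold Spec_build_color_palette_py; infer_instance

-- ===== CLAIM (what is proved, stated in full; the proofs are below) =====
def Claim_equal_build_color_palette_py : Prop := ∀ (named_colors : List (String × String)), Dom_build_color_palette_py named_colors → Spec_build_color_palette_py named_colors (build_color_palette_py named_colors)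

-- ===== LEMMAS AND PROOFS =====

-- the (rank, key) enumeration of each group, as the inverse index sees it
def pvE (g : String) : List (Int × String) :=
  if g = "brand" then [(0, "primary"), (1, "secondary"), (2, "tertiary"), (3, "primary_container"), (4, "secondary_container"), (5, "tertiary_container")]
  else if g = "surface" then [(0, "background"), (1, "surface"), (2, "surface_bright"), (3, "surface_dim"), (4, "surface_variant"), (5, "surface_container"), (6, "surface_container_low"), (7, "surface_container_lowest"), (8, "surface_container_high"), (9, "surface_container_highest")]
  else if g = "semantic" then [(0, "error"), (1, "error_container"), (2, "on_error"), (3, "on_error_container")]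
  else if g = "text" then [(0, "on_background"), (1, "on_surface"), (2, "on_surface_variant"), (3, "on_primary"), (4, "on_secondary"), (5, "on_tertiary"), (6, "on_primary_container"), (7, "on_secondary_container"), (8, "on_tertiary_container")]
  else if g = "outline" then [(0, "outline"), (1, "outline_variant")]
  else []

-- pvIndex characterized against the group enumerations
theorem pv_index_char (k : String) (g : String) (i : Int) :
    pvIndex.get? k = some (g, i) ↔ (i, k) ∈ pvE g := by
  rw [PySem.Dict.get?_eq_some_iff_mem_items pvIndex k (g, i) (by decide)]
  constructor
  · intro h
    simp only [pvIndex, List.mem_cons, List.not_mem_nil, or_false, Prod.mk.injEq] at h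
    rcases h with (⟨hk, hg, hi⟩|⟨hk, hg, hi⟩|⟨hk, hg, hi⟩|⟨hk, hg, hi⟩|⟨hk, hg, hi⟩|⟨hk, hg, hi⟩|⟨hk, hg, hi⟩|⟨hk, hg, hi⟩|⟨hk, hg, hi⟩|⟨hk, hg, hi⟩|⟨hk, hg, hi⟩|⟨hk, hg, hi⟩|⟨hk, hg, hi⟩|⟨hk, hg, hi⟩|⟨hk, hg, hi⟩|⟨hk, hg, hi⟩|⟨hk, hg, hi⟩|⟨hk, hg, hi⟩|⟨hk, hg, hi⟩|⟨hk, hg, hi⟩|⟨hk, hg, hi⟩|⟨hk, hg, hi⟩|⟨hk, hg, hi⟩|⟨hk, hg, hi⟩|⟨hk, hg, hi⟩|⟨hk, hg, hi⟩|⟨hk, hg, hi⟩|⟨hk, hg, hi⟩|⟨hk, hg, hi⟩|⟨hk, hg, hi⟩|⟨hk, hg, hi⟩) <;> (subst hk; subst hg; subst hi; decide)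
  · intro h
    unfold pvE at h
    split_ifs at h with h1 h2 h3 h4 h5 <;>
      [subst h1; subst h2; subst h3; subst h4; subst h5; skip] <;>
      [skip; skip; skip; skip; skip; exact absurd h (List.not_mem_nil)] <;>
      fin_cases h <;> decide

theorem pv_index_group (k : String) (gi : String × Int) (h : pvIndex.get? k = some gi) :
    gi.1 ∈ pvGroupNames := by
  have := (pv_index_char k gi.1 gi.2).mp (by simpa using h)
  unfold pvE at this
  split_ifs at this with h1 h2 h3 h4 h5 <;> simp_all [pvGroupNames]

theorem pvE_pairwise_lt (g : String) : (pvE g).Pairwise (fun a b => a.1 < b.1) := by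
  unfold pvE; split_ifs <;> decide

theorem pvE_pairwise_ne (g : String) : (pvE g).Pairwise (fun a b => a.2 ≠ b.2) := by
  unfold pvE; split_ifs <;> decide

-- B's routing loop, rewritten as a plain bucket-append fold over the routed list
def pvRouted (nc : PySem.Dict String String) : List (String × (Int × String × String)) :=
  nc.items.filterMap (fun kv => (pvIndex.get? kv.1).map (fun gi => (gi.1, (gi.2, kv.1, kv.2))))

theorem pv_route_fold (l : List (String × String)) (b : PySem.Dict String (List (Int × String × String))) :
    l.foldl (fun b kv =>
      match pvIndex.get? kv.1 with
      | some gi => b.modify gi.1 [] (fun es => es ++ [(gi.2, kv.1, kv.2)])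
      | none => b) b
    = (l.filterMap (fun kv => (pvIndex.get? kv.1).map (fun gi => (gi.1, (gi.2, kv.1, kv.2))))).foldl
        (fun b q => b.modify q.1 [] (fun es => es ++ [q.2])) b := by
  induction l generalizing b with
  | nil => rfl
  | cons kv l ih =>
    simp only [List.foldl_cons, List.filterMap_cons]
    cases h : pvIndex.get? kv.1 <;> simp [ih]

-- adding nothing new to a set leaves it unchanged
theorem pv_set_update_id (s : List String) (xs : List String) (h : ∀ x ∈ xs, x ∈ s) :
    PySem.Set.update s xs = s := by
  induction xs generalizing s with
  | nil => rfl
  | cons x xs ih =>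
    have hx : x ∈ s := h x (by simp)
    simp only [PySem.Set.update, List.foldl_cons] at *
    rw [show PySem.Set.add s x = s from by simp [PySem.Set.add, hx]]
    exact ih s (fun y hy => h y (by simp [hy]))

-- the sorted bucket of a group, named by the group enumeration
def pvT (nc : PySem.Dict String String) (g : String) : List (Int × String × String) :=
  (pvE g).filterMap (fun ik => (nc.get? ik.2).map (fun v => (ik.1, ik.2, v)))

theorem pvT_pairwise_lt (nc : PySem.Dict String String) (g : String) :
    (pvT nc g).Pairwise (fun a b => a.1 < b.1) := by
  refine List.Pairwise.filterMap _ ?_ (pvE_pairwise_lt g)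
  rintro a b hab x hx y hy
  simp only [Option.map_eq_some_iff] at hx hy
  obtain ⟨v, -, rfl⟩ := hx
  obtain ⟨w, -, rfl⟩ := hy
  exact hab

theorem pvT_pairwise_key_ne (nc : PySem.Dict String String) (g : String) :
    (pvT nc g).Pairwise (fun a b => a.2.1 ≠ b.2.1) := by
  refine List.Pairwise.filterMap _ ?_ (pvE_pairwise_ne g)
  rintro a b hab x hx y hy
  simp only [Option.map_eq_some_iff] at hx hy
  obtain ⟨v, -, rfl⟩ := hx
  obtain ⟨w, -, rfl⟩ := hy
  exact hab

theorem pvRouted_pairwise_key_ne (nc : PySem.Dict String String) (hnd : nc.keys.Nodup) :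
    (pvRouted nc).Pairwise (fun a b => a.2.2.1 ≠ b.2.2.1) := by
  have hpw : nc.items.Pairwise (fun p q => p.1 ≠ q.1) := by
    have : (nc.items.map Prod.fst).Nodup := hnd
    exact (List.pairwise_map.mp this)
  refine List.Pairwise.filterMap _ ?_ hpw
  rintro a b hab x hx y hy
  simp only [Option.map_eq_some_iff] at hx hy
  obtain ⟨v, -, rfl⟩ := hx
  obtain ⟨w, -, rfl⟩ := hy
  exact hab

theorem pv_sorted_bucket (nc : PySem.Dict String String) (hnd : nc.keys.Nodup) (g : String) :
    PySem.List.sorted (((pvRouted nc).filter (fun q => q.1 == g)).map (·.2)) (fun t => t.1) false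
      = pvT nc g := by
  apply PySem.List.sorted_eq_of_perm_of_pairwise_lt _ _ _ _ (pvT_pairwise_lt nc g)
  have hTnd : (pvT nc g).Nodup :=
    (pvT_pairwise_lt nc g).imp (fun h heq => absurd (heq ▸ h) (lt_irrefl _))
  have hBnd : (((pvRouted nc).filter (fun q => q.1 == g)).map (·.2)).Nodup := by
    have h1 : ((pvRouted nc).filter (fun q => q.1 == g)).Pairwise (fun a b => a.2.2.1 ≠ b.2.2.1) :=
      (pvRouted_pairwise_key_ne nc hnd).filter _
    have h2 : ((pvRouted nc).filter (fun q => q.1 == g)).Pairwise (fun a b => a.2 ≠ b.2) :=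
      h1.imp (fun h heq => h (congrArg (fun t => t.2.1) heq))
    exact List.pairwise_map.mpr h2
  refine (List.perm_ext_iff_of_nodup hTnd hBnd).mpr ?_
  rintro ⟨i, k, v⟩
  simp only [pvT, pvRouted, List.mem_filterMap, List.mem_map, List.mem_filter,
    Option.map_eq_some_iff, Prod.mk.injEq, beq_iff_eq]
  constructor
  · rintro ⟨⟨i', k'⟩, hik, v', hget, rfl, rfl, rfl⟩
    refine ⟨(g, (i', k', v')), ⟨⟨(k', v'), ?_, ⟨(g, i'), ?_, rfl⟩⟩, rfl⟩, rfl⟩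
    · exact (PySem.Dict.get?_eq_some_iff_mem_items nc k' v' hnd).mp hget
    · exact (pv_index_char k' g i').mpr hik
  · intro h
    obtain ⟨q, hq1, hq2⟩ := h
    obtain ⟨⟨⟨k', v'⟩, hmem, gi, hidx, hqe⟩, hq1g⟩ := hq1
    subst hqe
    simp only [Prod.mk.injEq] at hq2 hq1g
    obtain ⟨rfl, rfl, rfl⟩ := hq2
    subst hq1g
    exact ⟨(gi.2, k'), (pv_index_char k' gi.1 gi.2).mp (by simpa using hidx),
      v', (PySem.Dict.get?_eq_some_iff_mem_items nc k' v' hnd).mpr hmem, rfl, rfl, rfl⟩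

-- A's conditional-insert loop from empty lists exactly the hits, in key order
theorem pv_A_group_items_aux (nc : PySem.Dict String String) (ks : List String)
    (d : PySem.Dict String String) (hfresh : ∀ k ∈ ks, d.contains k = false)
    (hdnd : d.keys.Nodup) (hnd : ks.Nodup) :
    (ks.foldl (fun d k =>
      match nc.get? k with
      | some v => d.insert k v
      | none => d) d).items
    = d.items ++ ks.filterMap (fun k => (nc.get? k).map (fun v => (k, v))) := by
  induction ks generalizing d with
  | nil => simp
  | cons k ks ih =>
    simp only [List.foldl_cons, List.filterMap_cons]
    cases hget : nc.get? k with
    | none =>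
      simp only [Option.map_none]
      exact ih d (fun k' hk' => hfresh k' (by simp [hk'])) hdnd hnd.of_cons
    | some v =>
      simp only [Option.map_some]
      rw [ih (d.insert k v) ?fresh ?nd hnd.of_cons]
      · rw [PySem.Dict.items_insert_of_not_contains d _ (hfresh k (by simp))]
        simp
      case fresh =>
        intro k' hk'
        rw [PySem.Dict.contains_insert]
        have : k' ≠ k := fun h => (List.nodup_cons.mp hnd).1 (h ▸ hk')
        simp [this, hfresh k' (by simp [hk'])]
      case nd =>
        rw [PySem.Dict.keys_insert_of_not_contains d _ (hfresh k (by simp))]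
        have hk : k ∉ d.keys := by
          intro hk
          have h1 : d.contains k = true := by
            rw [PySem.Dict.contains_iff_mem_keys]; exact hk
          simp [hfresh k (by simp)] at h1
        exact hdnd.append (by simp) (by
          intro a ha hb
          simp only [List.mem_singleton] at hb
          exact hk (hb ▸ ha))

theorem pv_A_group_items (nc : PySem.Dict String String) (ks : List String) (hnd : ks.Nodup) :
    (ks.foldl (fun d k =>
      match nc.get? k with
      | some v => d.insert k v
      | none => d) PySem.Dict.empty).items
    = ks.filterMap (fun k => (nc.get? k).map (fun v => (k, v))) := by
  rw [pv_A_group_items_aux nc ks PySem.Dict.empty (by simp [PySem.Dict.contains_empty])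
    (by simp [PySem.Dict.keys_empty]) hnd]
  rfl

-- dropping the rank from the enumerated hit list
theorem pv_mapsnd (E : List (Int × String)) (o : String → Option String) :
    ((E.filterMap (fun ik => (o ik.2).map (fun v => (ik.1, ik.2, v)))).map (fun t => (t.2.1, t.2.2)))
    = (E.map (·.2)).filterMap (fun k => (o k).map (fun v => (k, v))) := by
  induction E with
  | nil => rfl
  | cons ik E ih =>
    simp only [List.filterMap_cons, List.map_cons]
    cases o ik.2 <;> simp only [Option.map_none, Option.map_some, List.map_cons, ih]

-- B's dict-comprehension over the sorted bucket has exactly A's items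
theorem pv_B_group_items (nc : PySem.Dict String String) (g : String) :
    ((pvT nc g).foldl (fun d t => d.insert t.2.1 t.2.2) PySem.Dict.empty).items
    = ((pvE g).map (·.2)).filterMap (fun k => (nc.get? k).map (fun v => (k, v))) := by
  rw [PySem.Dict.items_foldl_insert_fresh (pvT nc g) (fun t => t.2.1) (fun t => t.2.2)
    PySem.Dict.empty (by simp [PySem.Dict.contains_empty])
    ((List.pairwise_map.mpr (pvT_pairwise_key_ne nc g)))]
  simpa using pv_mapsnd (pvE g) (fun k => nc.get? k)



-- the initial bucket dict {g: [] for g in _GROUP_NAMES}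
def pvB0 : PySem.Dict String (List (Int × String × String)) :=
  PySem.Dict.mk [("brand", []), ("surface", []), ("semantic", []), ("text", []), ("outline", [])]

-- one group's sub-dict, both ways
theorem pv_group_dict_eq (nc : PySem.Dict String String) (hnd : nc.keys.Nodup)
    (g : String) (ks : List String) (hks : (pvE g).map (·.2) = ks) (hknd : ks.Nodup) :
    ((PySem.List.sorted (((pvRouted nc).filter (fun q => q.1 == g)).map (·.2)) (fun t => t.1) false).foldl
       (fun d t => d.insert t.2.1 t.2.2) PySem.Dict.empty)
    = (ks.foldl (fun d k =>
        match nc.get? k with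
        | some v => d.insert k v
        | none => d) PySem.Dict.empty) := by
  apply PySem.Dict.ext
  rw [pv_sorted_bucket nc hnd g, pv_B_group_items, pv_A_group_items nc ks hknd, hks]

theorem pv_main (nc : PySem.Dict String String) (hnd : nc.keys.Nodup) :
    (pvGroups.foldl (fun p gk =>
      p.insert gk.1 (gk.2.foldl (fun d k =>
        match nc.get? k with
        | some v => d.insert k v
        | none => d) PySem.Dict.empty)) PySem.Dict.empty)
    = ((nc.items.foldl (fun b kv =>
          match pvIndex.get? kv.1 with
          | some gi => b.modify gi.1 [] (fun es => es ++ [(gi.2, kv.1, kv.2)])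
          | none => b) (pvGroupNames.foldl (fun b g => b.insert g []) PySem.Dict.empty)).items.foldl
        (fun p ge =>
          p.insert ge.1 ((PySem.List.sorted ge.2 (fun t => t.1) false).foldl
            (fun d t => d.insert t.2.1 t.2.2) PySem.Dict.empty)) PySem.Dict.empty) := by
  have hB0 : (pvGroupNames.foldl (fun b g => b.insert g []) PySem.Dict.empty) = pvB0 := by decide
  rw [hB0, pv_route_fold nc.items pvB0]
  have hbk : (nc.items.filterMap (fun kv => (pvIndex.get? kv.1).map (fun gi => (gi.1, (gi.2, kv.1, kv.2))))).foldl
      (fun b q => b.modify q.1 [] (fun es => es ++ [q.2])) pvB0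
      = (pvRouted nc).foldl (fun b q => b.modify q.1 [] (fun es => es ++ [q.2])) pvB0 := rfl
  rw [hbk]
  have hbknd : ((pvRouted nc).foldl (fun b q => b.modify q.1 [] (fun es => es ++ [q.2])) pvB0).keys.Nodup :=
    PySem.Dict.nodup_keys_foldl_modify_key (pvRouted nc) (fun q => q.1) [] (fun _ q es => es ++ [q.2]) pvB0 (by decide)
  have hkeys : ((pvRouted nc).foldl (fun b q => b.modify q.1 [] (fun es => es ++ [q.2])) pvB0).keys = pvGroupNames := by
    have hupd := PySem.Dict.keys_foldl_modify_key (pvRouted nc) (fun q => q.1) ([] : List (Int × String × String)) (fun _ q es => es ++ [q.2]) pvB0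
    refine hupd.trans ?_
    rw [show pvB0.keys = pvGroupNames from rfl]
    apply pv_set_update_id
    intro x hx
    simp only [pvRouted, List.mem_map, List.mem_filterMap, Option.map_eq_some_iff] at hx
    obtain ⟨q, ⟨kv, hkv, gi, hget, rfl⟩, rfl⟩ := hx
    exact pv_index_group kv.1 gi hget
  have hitems : ((pvRouted nc).foldl (fun b q => b.modify q.1 [] (fun es => es ++ [q.2])) pvB0).items
      = pvGroupNames.map (fun g => (g, ((pvRouted nc).foldl (fun b q => b.modify q.1 [] (fun es => es ++ [q.2])) pvB0).getD g [])) := by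
    rw [PySem.Dict.items_eq_map_keys _ hbknd [], hkeys]
  rw [hitems]
  have hgd : ∀ g : String, ((pvRouted nc).foldl (fun b q => b.modify q.1 [] (fun es => es ++ [q.2])) pvB0).getD g []
      = pvB0.getD g [] ++ ((pvRouted nc).filter (fun q => q.1 == g)).map (fun q => q.2) :=
    fun g => PySem.Dict.getD_foldl_modify_append (pvRouted nc) pvB0 g
  have hg_brand := pv_group_dict_eq nc hnd "brand" ["primary", "secondary", "tertiary", "primary_container", "secondary_container", "tertiary_container"] (by decide) (by decide)
  have hg_surface := pv_group_dict_eq nc hnd "surface" ["background", "surface", "surface_bright", "surface_dim", "surface_variant", "surface_container", "surface_container_low", "surface_container_lowest", "surface_container_high", "surface_container_highest"] (by decide) (by decide)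
  have hg_semantic := pv_group_dict_eq nc hnd "semantic" ["error", "error_container", "on_error", "on_error_container"] (by decide) (by decide)
  have hg_text := pv_group_dict_eq nc hnd "text" ["on_background", "on_surface", "on_surface_variant", "on_primary", "on_secondary", "on_tertiary", "on_primary_container", "on_secondary_container", "on_tertiary_container"] (by decide) (by decide)
  have hg_outline := pv_group_dict_eq nc hnd "outline" ["outline", "outline_variant"] (by decide) (by decide)
  simp only [pvGroupNames, pvGroups, List.map_cons, List.map_nil, List.foldl_cons, List.foldl_nil]
  rw [hgd "brand", show pvB0.getD "brand" [] = [] from rfl, List.nil_append, hg_brand]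
  rw [hgd "surface", show pvB0.getD "surface" [] = [] from rfl, List.nil_append, hg_surface]
  rw [hgd "semantic", show pvB0.getD "semantic" [] = [] from rfl, List.nil_append, hg_semantic]
  rw [hgd "text", show pvB0.getD "text" [] = [] from rfl, List.nil_append, hg_text]
  rw [hgd "outline", show pvB0.getD "outline" [] = [] from rfl, List.nil_append, hg_outline]
  rfl

-- ===== VERDICT (by name: the statement is the Claim_ definition above) =====
theorem build_color_palette_py_spec : Claim_equal_build_color_palette_py := by
  intro named_colors _
  unfold Spec_build_color_palette_py
  simp only [build_color_palette_py, build_color_palette_py_alt]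
  have hnd : (PySem.Dict.ofList named_colors).keys.Nodup := PySem.Dict.nodup_keys_ofList named_colors
  generalize hnc : PySem.Dict.ofList named_colors = nc at hnd ⊢
  rw [pv_main nc hnd]
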